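-- pv_equiv track=rewrite | github.com/CarneadesofCyrene/BagsOfDigits | Base 8/Base 8 One Off Checking.py | run_program_base_8_generator
-- ===== SOURCE A (Python) =====
-- def base_8_conversion(n): # 2. Renamed function from base_7_conversion
--     """
--     Converts a non-negative integer to its octal (base-8) string representation.
--     """
--     if n == 0:
--         return '0'
--     nums = []
--     temp_n = abs(n)
--     while temp_n:
--         # 3. Change the base from 7 to 8
--         temp_n, r = divmod(temp_n, 8)
--         nums.append(str(r))
--     return ''.join(reversed(nums))
--
-- def length_of_string(s):
--     """
--     Returns the length of a string.
--     """
--     return len(s)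
--
-- def run_program_base_8_generator(current_sum): # Renamed function from run_program_base_7_generator
--     """
--     (GENERATOR) Yields the (a, b, c, d, e, f, g, h) data rows up to current_sum.
--     This saves memory by not storing all results in a list.
--     """
--     # Base 8 uses eight digits (0, 1, 2, 3, 4, 5, 6, 7), so we need octuples (a, b, c, d, e, f, g, h)
--     # The sum will be a + b + c + d + e + f + g + h = current_sum.
--     # Yielded data structure:
--     # [a, b, c, d, e, f, g, h, Total, TotalDigits]
--
--     # The nested loops to generate the (a, b, c, d, e, f, g, h) octuples
--     for a in range(current_sum + 1):
--         for b in range(current_sum + 1 - a):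
--             for c in range(current_sum + 1 - a - b):
--                 for d in range(current_sum + 1 - a - b - c):
--                     for e in range(current_sum + 1 - a - b - c - d):
--                         for f in range(current_sum + 1 - a - b - c - d - e):
--                             for g in range(current_sum + 1 - a - b - c - d - e - f):
--                                 # h is the remainder to make the sum equal to current_sum
--                                 h = current_sum - a - b - c - d - e - f - g
--
--                                 # Calculate base 8 representations
--                                 zeros8 = base_8_conversion(a)
--                                 ones8 = base_8_conversion(b)
--                                 twos8 = base_8_conversion(c)
--                                 threes8 = base_8_conversion(d)
--                                 fours8 = base_8_conversion(e)
--                                 fives8 = base_8_conversion(f)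
--                                 sixes8 = base_8_conversion(g)
--                                 sevens8 = base_8_conversion(h)
--
--                                 # Calculate lengths
--                                 zeros_count = length_of_string(zeros8)
--                                 ones_count = length_of_string(ones8)
--                                 twos_count = length_of_string(twos8)
--                                 threes_count = length_of_string(threes8)
--                                 fours_count = length_of_string(fours8)
--                                 fives_count = length_of_string(fives8)
--                                 sixes_count = length_of_string(sixes8)
--                                 sevens_count = length_of_string(sevens8)
--
--                                 # Calculate total digits
--                                 total_digits = zeros_count + ones_count + twos_count + threes_count + fours_count + fives_count + sixes_count + sevens_count
--
--                                 # YIELD the data row instead of appending to a list (added h, changed index for total_digits)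
--                                 row = [a, b, c, d, e, f, g, h, current_sum, total_digits]
--                                 yield row
-- ===== SOURCE B (Python) =====
-- def run_program_base_8_generator(current_sum):
--     """
--     (GENERATOR) Same rows as the original, but the seven hardcoded nested loops
--     are replaced by one recursive enumerator over the 8 parts, and the per-part
--     digit count is computed arithmetically instead of via octal strings.
--     """
--     def oct_len(v):
--         # number of octal digits of v (of abs(v); 0 has one digit)
--         v = abs(v)
--         d = 1
--         while v >= 8:
--             v //= 8
--             d += 1
--         return d
--
--     def enumerate_parts(parts_left, remaining, prefix):
--         if parts_left == 1:
--             parts = prefix + [remaining]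
--             total = 0
--             for x in parts:
--                 total += oct_len(x)
--             yield parts + [current_sum, total]
--         else:
--             for v in range(remaining + 1):
--                 yield from enumerate_parts(parts_left - 1, remaining - v, prefix + [v])
--
--     yield from enumerate_parts(8, current_sum, [])
-- ===== Notes on version B (the rewrite author's own statement) =====
-- stated objective: alternative
-- what changed: The seven hardcoded nested loops are replaced by one recursive enumerator over the eight parts (parts_left, remaining, prefix), and the per-part digit count is computed by repeated integer division instead of building the octal string and taking its length.
import Mathlib
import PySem

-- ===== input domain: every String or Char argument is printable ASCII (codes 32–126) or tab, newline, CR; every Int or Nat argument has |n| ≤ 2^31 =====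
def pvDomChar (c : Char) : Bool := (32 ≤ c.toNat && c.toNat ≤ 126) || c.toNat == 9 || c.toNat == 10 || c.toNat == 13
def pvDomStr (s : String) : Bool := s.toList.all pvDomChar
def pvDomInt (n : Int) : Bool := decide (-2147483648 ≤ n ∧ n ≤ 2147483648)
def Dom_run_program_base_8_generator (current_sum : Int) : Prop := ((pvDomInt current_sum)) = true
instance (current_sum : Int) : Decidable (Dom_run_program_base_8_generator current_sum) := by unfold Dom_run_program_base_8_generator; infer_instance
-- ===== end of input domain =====

-- B replaces A's seven hardcoded nested loops by one recursive part enumerator and its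
-- octal-string digit counting by integer arithmetic (objective: alternative decomposition, same cost).
-- Both Pythons are generators; the ports are the lists of yielded rows.

-- ===== PORT A =====

-- arithmetic facts about floor division by 8, used by the termination proofs of both loops
lemma floordiv8_facts (v : Int) (hv : 0 < v) :
    0 ≤ PySem.Int.floordiv v 8 ∧ PySem.Int.floordiv v 8 < v ∧
    (v < 8 → PySem.Int.floordiv v 8 = 0) ∧ (8 ≤ v → 0 < PySem.Int.floordiv v 8) := by
  rw [PySem.Int.floordiv_eq_ediv_of_pos (by norm_num)]
  have h0 : 0 ≤ v / 8 := Int.ediv_nonneg (by omega) (by norm_num)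
  have h1 : v / 8 * 8 ≤ v := Int.ediv_mul_le v (by norm_num)
  have h2 : v % 8 < 8 := Int.emod_lt_of_pos v (by norm_num)
  have h3 : 8 * (v / 8) + v % 8 = v := Int.ediv_add_emod v 8
  constructor
  · exact h0
  refine ⟨by nlinarith, ?_, ?_⟩ <;> intro h <;> omega

-- the 'while temp_n:' loop of base_8_conversion; only ever called with temp_n = |n| ≥ 0,
-- where 'while temp_n' is exactly 'while 0 < temp_n'
def base_8_conversion_loop (temp_n : Int) (nums : List String) : List String :=
  if _h : 0 < temp_n then
    base_8_conversion_loop (PySem.Int.floordiv temp_n 8) (nums ++ [PySem.Int.toStr (PySem.Int.mod temp_n 8)])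
  else nums
termination_by temp_n.toNat
decreasing_by
  obtain ⟨h0, h1, -, -⟩ := floordiv8_facts temp_n _h
  omega

def base_8_conversion (n : Int) : String :=
  if n = 0 then "0"
  else PySem.Str.join "" (base_8_conversion_loop |n| []).reverse

def length_of_string (s : String) : Int := PySem.Str.len s

def run_program_base_8_generator (current_sum : Int) : List (List Int) :=
  (PySem.List.pyRange 0 (current_sum + 1) 1).flatMap (fun a =>
    (PySem.List.pyRange 0 (current_sum + 1 - a) 1).flatMap (fun b =>
      (PySem.List.pyRange 0 (current_sum + 1 - a - b) 1).flatMap (fun c =>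
        (PySem.List.pyRange 0 (current_sum + 1 - a - b - c) 1).flatMap (fun d =>
          (PySem.List.pyRange 0 (current_sum + 1 - a - b - c - d) 1).flatMap (fun e =>
            (PySem.List.pyRange 0 (current_sum + 1 - a - b - c - d - e) 1).flatMap (fun f =>
              (PySem.List.pyRange 0 (current_sum + 1 - a - b - c - d - e - f) 1).flatMap (fun g =>
                let h := current_sum - a - b - c - d - e - f - g
                let zeros8 := base_8_conversion a
                let ones8 := base_8_conversion b
                let twos8 := base_8_conversion c
                let threes8 := base_8_conversion d
                let fours8 := base_8_conversion e
                let fives8 := base_8_conversion f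
                let sixes8 := base_8_conversion g
                let sevens8 := base_8_conversion h
                let zeros_count := length_of_string zeros8
                let ones_count := length_of_string ones8
                let twos_count := length_of_string twos8
                let threes_count := length_of_string threes8
                let fours_count := length_of_string fours8
                let fives_count := length_of_string fives8
                let sixes_count := length_of_string sixes8
                let sevens_count := length_of_string sevens8
                let total_digits := zeros_count + ones_count + twos_count + threes_count + fours_count + fives_count + sixes_count + sevens_count
                [[a, b, c, d, e, f, g, h, current_sum, total_digits]])))))))

-- ===== PORT B =====

-- oct_len: 'v = abs(v); d = 1; while v >= 8: v //= 8; d += 1'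
def pvOctLenLoop (v : Int) (d : Int) : Int :=
  if _h : 8 ≤ v then pvOctLenLoop (PySem.Int.floordiv v 8) (d + 1) else d
termination_by v.toNat
decreasing_by
  obtain ⟨h0, h1, -, -⟩ := floordiv8_facts v (by omega)
  omega

def pvOctLen (v : Int) : Int := pvOctLenLoop |v| 1

-- enumerate_parts(parts_left, remaining, prefix)
def pvEnumParts (current_sum : Int) : Nat → Int → List Int → List (List Int)
  | 0, _, _ => []  -- never reached: called with parts_left = 8 and decremented down to 1
  | 1, remaining, prefixParts =>
      let parts := prefixParts ++ [remaining]
      [parts ++ [current_sum, parts.foldl (fun t x => t + pvOctLen x) 0]]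
  | (k+2), remaining, prefixParts =>
      (PySem.List.pyRange 0 (remaining + 1) 1).flatMap (fun v =>
        pvEnumParts current_sum (k+1) (remaining - v) (prefixParts ++ [v]))

def run_program_base_8_generator_alt (current_sum : Int) : List (List Int) :=
  pvEnumParts current_sum 8 current_sum []

-- ===== PRECONDITION & SPEC =====
def Spec_run_program_base_8_generator (current_sum : Int) (out : List (List Int)) : Prop := out = run_program_base_8_generator_alt current_sum
instance (current_sum : Int) (out : List (List Int)) : Decidable (Spec_run_program_base_8_generator current_sum out) := by unfold Spec_run_program_base_8_generator; infer_instance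

-- ===== CLAIM (what is proved, stated in full; the proofs are below) =====
def Claim_equal_run_program_base_8_generator : Prop := ∀ (current_sum : Int), Dom_run_program_base_8_generator current_sum → Spec_run_program_base_8_generator current_sum (run_program_base_8_generator current_sum)

-- ===== LEMMAS AND PROOFS =====

-- the accumulator of pvOctLenLoop is additive
lemma pvOctLenLoop_shift (n : Nat) : ∀ v d : Int, v.toNat ≤ n → pvOctLenLoop v (d + 1) = pvOctLenLoop v d + 1 := by
  induction n with
  | zero =>
    intro v d h
    have : ¬ (8 ≤ v) := by omega
    conv_lhs => rw [pvOctLenLoop]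
    conv_rhs => rw [pvOctLenLoop]
    simp [this]
  | succ n ih =>
    intro v d h
    conv_lhs => rw [pvOctLenLoop]
    conv_rhs => rw [pvOctLenLoop]
    by_cases h8 : 8 ≤ v
    · simp only [dif_pos h8]
      apply ih
      obtain ⟨ha, hb, -, -⟩ := floordiv8_facts v (by omega)
      omega
    · simp [h8]

-- each digit string str(temp_n % 8) produced by A's loop is one character long
lemma digit_len (t : Int) : (PySem.Int.toStr (PySem.Int.mod t 8)).toList.length = 1 := by
  have h0 : 0 ≤ PySem.Int.mod t 8 := PySem.Int.mod_nonneg t (by norm_num)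
  have h1 : PySem.Int.mod t 8 < 8 := PySem.Int.mod_lt t (by norm_num)
  rw [PySem.Int.toList_toStr]
  set m := PySem.Int.mod t 8 with hm
  interval_cases m <;> decide

lemma loop_elem_len (n : Nat) : ∀ (t : Int) (nums : List String), t.toNat ≤ n →
    (∀ s ∈ nums, s.toList.length = 1) →
    ∀ s ∈ base_8_conversion_loop t nums, s.toList.length = 1 := by
  induction n with
  | zero =>
    intro t nums hb hn
    rw [base_8_conversion_loop]
    simp only [dif_neg (by omega : ¬ 0 < t)]
    exact hn
  | succ n ih =>
    intro t nums hb hn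
    rw [base_8_conversion_loop]
    by_cases hp : 0 < t
    · simp only [dif_pos hp]
      obtain ⟨ha, hc, -, -⟩ := floordiv8_facts t hp
      refine ih _ _ (by omega) ?_
      intro s hs
      rcases List.mem_append.mp hs with h | h
      · exact hn s h
      · simp only [List.mem_singleton] at h
        subst h
        exact digit_len t
    · simp only [dif_neg hp]
      exact hn

-- the number of digit strings A's loop appends equals B's arithmetic digit count
lemma loop_len (n : Nat) : ∀ (t : Int) (nums : List String), 0 ≤ t → t.toNat ≤ n →
    ((base_8_conversion_loop t nums).length : Int) =
      nums.length + (if t = 0 then 0 else pvOctLenLoop t 1) := by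
  induction n with
  | zero =>
    intro t nums h0 hn
    have ht : t = 0 := by omega
    subst ht
    rw [base_8_conversion_loop]
    simp
  | succ n ih =>
    intro t nums h0 hn
    conv_lhs => rw [base_8_conversion_loop]
    by_cases hp : 0 < t
    · simp only [dif_pos hp]
      obtain ⟨ha, hb, hc, hd⟩ := floordiv8_facts t hp
      rw [ih _ _ ha (by omega)]
      conv_rhs => rw [pvOctLenLoop]
      by_cases h8 : 8 ≤ t
      · have hfd : ¬ (PySem.Int.floordiv t 8 = 0) := by have := hd h8; omega
        simp only [dif_pos h8, if_neg hfd, if_neg (by omega : ¬ t = 0)]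
        rw [pvOctLenLoop_shift (PySem.Int.floordiv t 8).toNat _ 1 le_rfl]
        simp
        omega
      · have hfd : PySem.Int.floordiv t 8 = 0 := hc (by omega)
        simp only [dif_neg h8, hfd, if_neg (by omega : ¬ t = 0)]
        simp
    · have ht : t = 0 := by omega
      subst ht
      simp only [dif_neg hp]
      simp

-- the length of ''.join of single-character strings is the number of strings
lemma len_join_ones : ∀ (l : List (List Char)), (∀ p ∈ l, p.length = 1) →
    (PySem.Chars.join [] l).length = l.length := by
  intro l
  induction l with
  | nil => intro _; rw [PySem.Chars.join_nil]; rfl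
  | cons p rest ih =>
    intro h
    cases rest with
    | nil =>
      rw [PySem.Chars.join_singleton]
      simpa using h p (by simp)
    | cons q rs =>
      rw [PySem.Chars.join_cons_cons]
      have hp := h p (by simp)
      have := ih (fun x hx => h x (by simp [hx]))
      simp only [List.length_append, this, hp]
      simp
      omega

-- key lemma: A's per-component string length equals B's arithmetic octal digit count
lemma len_b8 (n : Int) : length_of_string (base_8_conversion n) = pvOctLen n := by
  unfold length_of_string base_8_conversion pvOctLen
  by_cases h0 : n = 0
  · subst h0
    rw [pvOctLenLoop]
    norm_num
    decide
  · simp only [if_neg h0]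
    rw [PySem.Str.len_eq, PySem.Str.toList_join]
    have hsep : ("" : String).toList = [] := rfl
    rw [hsep]
    have habs : 0 < |n| := by positivity
    have helems := loop_elem_len |n|.toNat |n| [] le_rfl (by simp)
    have hlen := loop_len |n|.toNat |n| [] (by omega) le_rfl
    rw [len_join_ones]
    · simp only [List.length_map, List.length_reverse]
      rw [if_neg (by omega : ¬ |n| = 0)] at hlen
      simpa using hlen
    · intro p hp
      simp only [List.map_reverse, List.mem_reverse, List.mem_map] at hp
      obtain ⟨s, hs, rfl⟩ := hp
      exact helems s hs

-- unfolding equations of pvEnumParts (definitional)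
lemma pvEnumParts_step {cs r : Int} {p : List Int} {k : Nat} :
    pvEnumParts cs (k+2) r p =
      (PySem.List.pyRange 0 (r + 1) 1).flatMap (fun v => pvEnumParts cs (k+1) (r - v) (p ++ [v])) := rfl

lemma pvEnumParts_one {cs r : Int} {p : List Int} :
    pvEnumParts cs 1 r p = [(p ++ [r]) ++ [cs, (p ++ [r]).foldl (fun t x => t + pvOctLen x) 0]] := rfl

theorem main_eq (cs : Int) : run_program_base_8_generator cs = run_program_base_8_generator_alt cs := by
  unfold run_program_base_8_generator run_program_base_8_generator_alt
  show _ = pvEnumParts cs (6+2) cs []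
  rw [pvEnumParts_step]
  simp only [pvEnumParts_step, pvEnumParts_one, List.foldl_cons, List.foldl_nil, List.nil_append,
    List.cons_append, zero_add, len_b8, sub_add_eq_add_sub]

-- ===== VERDICT (by name: the statement is the Claim_ definition above) =====
theorem run_program_base_8_generator_spec : Claim_equal_run_program_base_8_generator := by
  intro cs _
  unfold Spec_run_program_base_8_generator
  exact main_eq cs
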